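-- pv_equiv track=rewrite | github.com/youmikimm/problem-solved | 프로그래머스/2/42586. 기능개발/기능개발.py | solution
-- ===== SOURCE A (Python) =====
-- import math
-- from collections import deque
--
-- def solution(progresses, speeds):
--     answer = [] # 배포할 작업 개수 배열
--     days_count = [] # 작업완료까지 남은 날짜 배열
--     q = deque()
--
--     for p, s in zip(progresses, speeds):
--         days_count.append(math.ceil((100-p) / s))
--
--     for day in days_count:
--         if len(q) == 0:
--             q.append(day)
--             answer.append(0)
--         else:
--             if q[0] < day:
--                 while q:
--                     q.popleft()
--                     answer[-1] += 1
--                 q.append(day)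
--                 answer.append(0)
--             else:
--                 q.append(day)
--
--     while q:
--         q.popleft()
--         answer[-1] += 1
--
--     return answer
-- ===== SOURCE B (Python) =====
-- import math
-- from itertools import accumulate, groupby
--
-- def solution(progresses, speeds):
--     days = [math.ceil((100 - p) / s) for p, s in zip(progresses, speeds)]
--     return [sum(1 for _ in group) for _, group in groupby(accumulate(days, max))]
-- ===== Notes on version B (the rewrite author's own statement) =====
-- stated objective: alternative
-- what changed: Instead of simulating the deploy queue (deque with inner popleft-drain loops keyed on the batch leader), B observes that the answer is exactly the run-length encoding of the prefix-maximum sequence of finish days, and computes it as accumulate(days, max) followed by groupby run lengths.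
import Mathlib
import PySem

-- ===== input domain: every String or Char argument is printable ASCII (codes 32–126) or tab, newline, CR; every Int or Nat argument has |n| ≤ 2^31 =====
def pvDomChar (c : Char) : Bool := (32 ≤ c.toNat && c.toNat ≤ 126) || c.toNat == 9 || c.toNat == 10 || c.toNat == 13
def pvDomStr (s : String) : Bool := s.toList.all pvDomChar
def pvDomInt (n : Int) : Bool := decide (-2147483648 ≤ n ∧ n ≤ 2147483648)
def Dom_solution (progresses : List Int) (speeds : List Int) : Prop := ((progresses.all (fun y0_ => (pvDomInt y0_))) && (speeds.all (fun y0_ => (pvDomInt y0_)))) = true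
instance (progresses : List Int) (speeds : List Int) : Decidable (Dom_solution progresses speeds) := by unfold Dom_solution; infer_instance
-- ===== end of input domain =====

-- B drops A's queue simulation (deque + inner drain while-loops) entirely: the answer
-- is the run-length encoding of the prefix-maximum sequence of the finish days; objective: alternative.

-- ===== PORT A =====

-- math.ceil((100-p)/s) on Dom (|ints| ≤ 2^31, s ≠ 0): the float quotient's rounding
-- error (≤ |q|·2⁻⁵³ < 2³²·2⁻⁵³) is smaller than the gap 1/|s| ≥ 2⁻³¹ between the true
-- quotient and the next integer, so the float ceil is EXACTLY the integer ceiling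
-- ⌈(100-p)/s⌉ = -((p-100) // s); ported as such.
def ceilDays (p s : Int) : Int := -(PySem.Int.floordiv (p - 100) s)

-- the 'answer[-1] += 1' step
def incLast : List Int → List Int
  | [] => []
  | [x] => [x + 1]
  | x :: xs => x :: incLast xs

-- the 'while q: q.popleft(); answer[-1] += 1' drain loops, step for step
def drainA : List Int → List Int → List Int
  | [], ans => ans
  | _ :: t, ans => drainA t (incLast ans)

-- body of A's 'for day in days_count' loop
def stepA (st : List Int × List Int) (day : Int) : List Int × List Int :=
  match st with
  | (q, ans) =>
    match q with
    | [] => ([day], ans ++ [0])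
    | h :: _ =>
      if h < day then ([day], drainA q ans ++ [0])
      else (q ++ [day], ans)

def solution (progresses : List Int) (speeds : List Int) : List Int :=
  let daysCount := (progresses.zip speeds).map (fun ps => ceilDays ps.1 ps.2)
  let st := daysCount.foldl stepA ([], [])
  drainA st.1 st.2

-- ===== PORT B =====

-- tail of itertools.accumulate(_, max) after the seed: running maxima
def accRun : Int → List Int → List Int
  | _, [] => []
  | m, e :: r => (max m e) :: accRun (max m e) r

-- itertools.accumulate(days, max)
def accumMax : List Int → List Int
  | [] => []
  | d :: rest => d :: accRun d rest

-- one groupby group: count the current run (key x, count c so far)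
def rlGo : Int → Int → List Int → List Int
  | _, c, [] => [c]
  | x, c, y :: ys => if y = x then rlGo x (c + 1) ys else c :: rlGo y 1 ys

-- [sum(1 for _ in group) for _, group in groupby(xs)]
def runLengths : List Int → List Int
  | [] => []
  | x :: xs => rlGo x 1 xs

def solution_alt (progresses : List Int) (speeds : List Int) : List Int :=
  let days := (progresses.zip speeds).map (fun ps => ceilDays ps.1 ps.2)
  runLengths (accumMax days)

-- ===== PRECONDITION & SPEC =====

-- Pre_ excludes exactly the inputs where Python A raises ZeroDivisionError:
-- a zero speed at a position that zip actually pairs with a progress entry.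
def Pre_solution (progresses : List Int) (speeds : List Int) : Prop :=
  ∀ s ∈ speeds.take progresses.length, s ≠ 0

instance (progresses : List Int) (speeds : List Int) : Decidable (Pre_solution progresses speeds) := by
  unfold Pre_solution; infer_instance

def pvWitness_solution : List Int × List Int := ([93, 30, 55], [1, 30, 5])

def Spec_solution (progresses : List Int) (speeds : List Int) (out : List Int) : Prop :=
  out = solution_alt progresses speeds

instance (progresses : List Int) (speeds : List Int) (out : List Int) : Decidable (Spec_solution progresses speeds out) := by
  unfold Spec_solution; infer_instance

-- ===== CLAIM =====

def Claim_equal_solution : Prop := ∀ (progresses : List Int) (speeds : List Int),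
  Dom_solution progresses speeds → Pre_solution progresses speeds →
  Spec_solution progresses speeds (solution progresses speeds)

-- ===== LEMMAS AND PROOFS =====

-- common reference: batch sizes of days, given the current batch leader and its count so far
def batches : Int → Int → List Int → List Int
  | _, cnt, [] => [cnt]
  | th, cnt, d :: rest => if d ≤ th then batches th (cnt + 1) rest else cnt :: batches d 1 rest

theorem incLast_append (a : List Int) (x : Int) : incLast (a ++ [x]) = a ++ [x + 1] := by
  induction a with
  | nil => rfl
  | cons h t ih =>
    cases t with
    | nil => simp [incLast]
    | cons h2 t2 => simp [incLast] at ih ⊢; exact ih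

theorem drainA_append (q : List Int) (a : List Int) (c : Int) :
    drainA q (a ++ [c]) = a ++ [c + q.length] := by
  induction q generalizing c with
  | nil => simp [drainA]
  | cons h t ih =>
    simp only [drainA, incLast_append, ih]
    simp; ring

-- A's loop + final drain computes the batch sizes
theorem loopA (rest : List Int) (q : List Int) (th : Int) (tl : List Int) (ans : List Int)
    (hq : q = th :: tl) :
    (let st := rest.foldl stepA (q, ans ++ [0]); drainA st.1 st.2)
      = ans ++ batches th (q.length : Int) rest := by
  induction rest generalizing q th tl ans with
  | nil =>
    subst hq
    simp [batches, drainA_append]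
  | cons day rest ih =>
    subst hq
    by_cases hle : day ≤ th
    · have hA : stepA (th :: tl, ans ++ [0]) day = (th :: tl ++ [day], ans ++ [0]) := by
        simp [stepA, not_lt.mpr hle]
      simp only [List.foldl_cons, hA, batches, if_pos hle]
      have := ih (th :: tl ++ [day]) th (tl ++ [day]) ans rfl
      simpa [add_comm] using this
    · have hlt : th < day := lt_of_not_ge hle
      have hA : stepA (th :: tl, ans ++ [0]) day
          = ([day], (ans ++ [((th :: tl).length : Int)]) ++ [0]) := by
        simp [stepA, hlt, drainA_append]
      simp only [List.foldl_cons, hA, batches, if_neg hle]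
      have := ih [day] day [] (ans ++ [((th :: tl).length : Int)]) rfl
      simpa using this

-- B's run-length pass over the running maxima computes the batch sizes
theorem loopB (rest : List Int) (th c : Int) :
    rlGo th c (accRun th rest) = batches th c rest := by
  induction rest generalizing th c with
  | nil => rfl
  | cons e r ih =>
    by_cases hle : e ≤ th
    · have hmax : max th e = th := max_eq_left hle
      simp [accRun, rlGo, hmax, batches, if_pos hle, ih]
    · have hlt : th < e := lt_of_not_ge hle
      have hmax : max th e = e := max_eq_right (le_of_lt hlt)
      simp [accRun, rlGo, hmax, batches, if_neg hle, ne_of_gt hlt, ih]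

-- ===== VERDICT =====

theorem solution_spec : Claim_equal_solution := by
  intro progresses speeds _ _
  unfold Spec_solution solution solution_alt
  cases hd : (progresses.zip speeds).map (fun ps => ceilDays ps.1 ps.2) with
  | nil => simp [drainA, accumMax, runLengths]
  | cons d rest =>
    simp only [List.foldl_cons, accumMax, runLengths]
    have h0 : stepA ([], []) d = ([d], ([] : List Int) ++ [0]) := by simp [stepA]
    rw [h0]
    have hA := loopA rest [d] d [] [] rfl
    have hB := loopB rest d 1
    simpa [hB] using hA
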